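-- pv_equiv track=rewrite | github.com/taigi0315/study_english_with_suits | langflix/slides/generator.py | _clean_for_draw
-- ===== SOURCE A (Python) =====
-- def _clean_for_draw(text: str, limit: int) -> str:
--     if not isinstance(text, str):
--         text = str(text)
--     text = (
--         text.replace("'", "")
--         .replace('"', "")
--         .replace(":", "")
--         .replace(",", "")
--         .replace("\\", "")
--         .replace("\n", " ")
--         .replace("\t", " ")
--     )
--     text = "".join(c for c in text if c.isprintable() and c not in "@#$%^&*+=|<>")
--     text = " ".join(text.split())
--     return text[:limit] if text else ""
-- ===== SOURCE B (Python) =====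
-- def _clean_for_draw(text: str, limit: int) -> str:
--     if not isinstance(text, str):
--         text = str(text)
--     out = []
--     for c in text:
--         if c in "'\":,\\@#$%^&*+=|<>":
--             continue
--         if c in " \n\t":
--             if out and out[-1] != " ":
--                 out.append(" ")
--         elif c.isprintable():
--             out.append(c)
--     if out and out[-1] == " ":
--         out.pop()
--     return "".join(out)[:limit]
-- ===== Notes on version B (the rewrite author's own statement) =====
-- stated objective: alternative
-- what changed: Replaces A's seven-pass replace chain plus filter plus split/join pipeline by a single left-to-right pass that maintains an output buffer and collapses whitespace on the fly via the buffer's last character.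
import Mathlib
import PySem

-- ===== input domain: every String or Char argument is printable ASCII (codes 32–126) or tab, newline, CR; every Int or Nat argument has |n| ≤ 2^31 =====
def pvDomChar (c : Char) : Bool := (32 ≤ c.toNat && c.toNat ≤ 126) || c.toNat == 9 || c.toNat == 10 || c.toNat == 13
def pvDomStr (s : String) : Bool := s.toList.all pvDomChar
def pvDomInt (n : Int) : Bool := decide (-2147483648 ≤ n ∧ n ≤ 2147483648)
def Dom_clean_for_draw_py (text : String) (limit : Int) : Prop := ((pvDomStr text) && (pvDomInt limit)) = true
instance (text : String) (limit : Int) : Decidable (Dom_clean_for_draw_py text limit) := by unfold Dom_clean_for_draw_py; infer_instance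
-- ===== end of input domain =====

-- B replaces A's multi-pass pipeline (seven .replace passes, a filter, split/join) by one
-- left-to-right pass with an output buffer that collapses whitespace on the fly (objective: alternative).


-- ===== PORT A =====
-- c.isprintable(): exact on the stated domain (printable ASCII 32..126 plus tab/newline/CR)
def pvPrintable (c : Char) : Bool := 32 ≤ c.toNat && c.toNat ≤ 126
-- "@#$%^&*+=|<>"
def pvSpecials : List Char := ['@', '#', '$', '%', '^', '&', '*', '+', '=', '|', '<', '>']

def clean_for_draw_py (text : String) (limit : Int) : String :=
  let t0 := text.toList
  let t1 := PySem.Chars.replace t0 ['\''] []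
  let t2 := PySem.Chars.replace t1 ['"'] []
  let t3 := PySem.Chars.replace t2 [':'] []
  let t4 := PySem.Chars.replace t3 [','] []
  let t5 := PySem.Chars.replace t4 ['\\'] []
  let t6 := PySem.Chars.replace t5 ['\n'] [' ']
  let t7 := PySem.Chars.replace t6 ['\t'] [' ']
  -- "".join(c for c in text if c.isprintable() and c not in "@#$%^&*+=|<>")
  let t8 := PySem.Chars.join []
    ((t7.filter (fun c => pvPrintable c && !(pvSpecials.contains c))).map (fun c => [c]))
  -- " ".join(text.split())
  let t9 := PySem.Chars.join [' '] (PySem.Chars.split₀ t8)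
  -- text[:limit] if text else ""
  if t9.isEmpty then "" else String.ofList (PySem.Chars.slice t9 none (some limit))

-- ===== PORT B =====
-- "'\":,\\@#$%^&*+=|<>"
def pvSkip : List Char := ['\'', '"', ':', ',', '\\', '@', '#', '$', '%', '^', '&', '*', '+', '=', '|', '<', '>']

-- the loop body of Source B
def pvStep (acc : List Char) (c : Char) : List Char :=
  if pvSkip.contains c then acc
  else if [' ', '\n', '\t'].contains c then
    (if acc ≠ [] ∧ acc.getLast? ≠ some ' ' then acc ++ [' '] else acc)
  else if pvPrintable c then acc ++ [c] else acc

def clean_for_draw_py_alt (text : String) (limit : Int) : String :=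
  let out := text.toList.foldl pvStep []
  -- if out and out[-1] == " ": out.pop()
  let out := if out ≠ [] ∧ out.getLast? = some ' ' then out.dropLast else out
  -- "".join(out)[:limit]
  String.ofList (PySem.Chars.slice (PySem.Chars.join [] (out.map (fun c => [c]))) none (some limit))

-- ===== PRECONDITION & SPEC =====
def Spec_clean_for_draw_py (text : String) (limit : Int) (out : String) : Prop := out = clean_for_draw_py_alt text limit
instance (text : String) (limit : Int) (out : String) : Decidable (Spec_clean_for_draw_py text limit out) := by unfold Spec_clean_for_draw_py; infer_instance

-- ===== CLAIM (what is proved, stated in full; the proofs are below) =====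
def Claim_equal_clean_for_draw_py : Prop := ∀ (text : String) (limit : Int), Dom_clean_for_draw_py text limit → Spec_clean_for_draw_py text limit (clean_for_draw_py text limit)

-- ===== LEMMAS AND PROOFS =====

-- per-char effect of A's replace chain
def pvSub (c : Char) : Option Char :=
  if c = '\'' ∨ c = '"' ∨ c = ':' ∨ c = ',' ∨ c = '\\' then none
  else if c = '\n' ∨ c = '\t' then some ' '
  else some c

def pvKeep (c : Char) : Bool := pvPrintable c && !(pvSpecials.contains c)

-- per-char effect of A's whole char-level preprocessing (replace chain, then the printable/specials filter)
def pvQ (c : Char) : Option Char := Option.filter pvKeep (pvSub c)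

-- the action of pvStep on an already-preprocessed character
def pvStep2 (acc : List Char) (d : Char) : List Char :=
  if d = ' ' then (if acc ≠ [] ∧ acc.getLast? ≠ some ' ' then acc ++ [' '] else acc)
  else acc ++ [d]

-- B's interim buffer, expressed from split₀'s state: completed words ws (plus one pending space) and the current word
def pvPref (ws : List (List Char)) : List Char :=
  if ws.isEmpty then [] else PySem.Chars.join [' '] ws ++ [' ']

def pvStrip (out : List Char) : List Char :=
  if out ≠ [] ∧ out.getLast? = some ' ' then out.dropLast else out

theorem pv_go_single (o : Char) (ns : List Char) :
    ∀ (l : List Char) (acc : List Char) (fuel : Nat), l.length ≤ fuel →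
      PySem.Chars.replace.go [o] ns fuel l acc
        = acc.reverse ++ l.flatMap (fun c => if c = o then ns else [c]) := by
  intro l
  induction l with
  | nil => intro acc fuel _; cases fuel <;> simp [PySem.Chars.replace.go]
  | cons c t ih =>
    intro acc fuel hf
    cases fuel with
    | zero => simp at hf
    | succ n =>
      by_cases hc : c = o
      · subst hc
        simp only [PySem.Chars.replace.go, List.isPrefixOf, BEq.rfl, Bool.true_and,
          if_pos, List.length_cons, List.drop_succ_cons]
        simp only [List.length_nil, List.drop_zero]
        rw [ih _ n (by simpa using hf)]
        simp
      · have : ([o].isPrefixOf (c :: t)) = false := by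
          simp [List.isPrefixOf]; exact fun h => (hc h.symm).elim
        simp only [PySem.Chars.replace.go, this, Bool.false_eq_true, if_neg, not_false_iff]
        rw [ih _ n (by simpa using hf)]
        simp [hc]
theorem pv_replace_single (cs : List Char) (o : Char) (ns : List Char) :
    PySem.Chars.replace cs [o] ns = cs.flatMap (fun c => if c = o then ns else [c]) := by
  rw [PySem.Chars.replace]
  simp [pv_go_single o ns cs [] cs.length (le_refl _)]

theorem pv_chain_eq (cs : List Char) :
    PySem.Chars.replace (PySem.Chars.replace (PySem.Chars.replace (PySem.Chars.replace
      (PySem.Chars.replace (PySem.Chars.replace (PySem.Chars.replace cs ['\''] []) ['"'] [])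
        [':'] []) [','] []) ['\\'] []) ['\n'] [' ']) ['\t'] [' ']
      = cs.filterMap pvSub := by
  simp only [pv_replace_single, List.flatMap_assoc]
  induction cs with
  | nil => simp
  | cons c t ih =>
    simp only [List.flatMap_cons, List.filterMap_cons]
    by_cases h1 : c = '\'' ; · subst h1; simpa [pvSub] using ih
    by_cases h2 : c = '"' ; · subst h2; simpa [pvSub] using ih
    by_cases h3 : c = ':' ; · subst h3; simpa [pvSub] using ih
    by_cases h4 : c = ',' ; · subst h4; simpa [pvSub] using ih
    by_cases h5 : c = '\\' ; · subst h5; simpa [pvSub] using ih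
    by_cases h6 : c = '\n' ; · subst h6; simpa [pvSub] using ih
    by_cases h7 : c = '\t' ; · subst h7; simpa [pvSub] using ih
    simp [pvSub, h1, h2, h3, h4, h5, h6, h7, ih]

theorem pv_step_eq (acc : List Char) (c : Char) :
    pvStep acc c = match pvQ c with | none => acc | some d => pvStep2 acc d := by
  by_cases hskip : c ∈ pvSkip
  · simp only [pvSkip, List.mem_cons, List.not_mem_nil, or_false] at hskip
    rcases hskip with rfl|rfl|rfl|rfl|rfl|rfl|rfl|rfl|rfl|rfl|rfl|rfl|rfl|rfl|rfl|rfl|rfl <;>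
      simp [pvStep, pvQ, pvSub, pvKeep, pvStep2, pvSkip, pvSpecials, Option.filter]
  · have hns : pvSkip.contains c = false := by
      simp only [List.contains_eq_mem, decide_eq_false_iff_not]; exact hskip
    have hsub : pvSub c = if c = '\n' ∨ c = '\t' then some ' ' else some c := by
      unfold pvSub
      rw [if_neg]
      intro hor
      apply hskip
      rcases hor with rfl|rfl|rfl|rfl|rfl <;> simp [pvSkip]
    have hnsp : pvSpecials.contains c = false := by
      simp only [List.contains_eq_mem, decide_eq_false_iff_not]
      intro hm
      apply hskip
      simp only [pvSpecials, List.mem_cons, List.not_mem_nil, or_false] at hm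
      rcases hm with rfl|rfl|rfl|rfl|rfl|rfl|rfl|rfl|rfl|rfl|rfl|rfl <;> simp [pvSkip]
    by_cases hsp : c = ' ' ∨ c = '\n' ∨ c = '\t'
    · rcases hsp with rfl|rfl|rfl <;>
        simp [pvStep, pvQ, pvSub, pvKeep, pvStep2, hskip, Option.filter, pvSpecials, pvPrintable]
    · push_neg at hsp
      obtain ⟨hs1, hs2, hs3⟩ := hsp
      have hmem2 : c ∉ pvSpecials := by simpa using hnsp
      have hq : pvQ c = if pvPrintable c then some c else none := by
        unfold pvQ Option.filter pvKeep
        rw [hsub, if_neg (by tauto)]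
        simp [hmem2]
      have hmem : ([' ', '\n', '\t'].contains c) = false := by
        simp only [List.contains_eq_mem, decide_eq_false_iff_not]
        simp [hs1, hs2, hs3]
      by_cases hp : pvPrintable c = true
      · simp [pvStep, hskip, hp, hq, pvStep2, hs1, hs2, hs3]
      · simp only [Bool.not_eq_true] at hp
        simp [pvStep, hskip, hp, hq, hs1, hs2, hs3]

theorem pv_fold_eq (cs : List Char) : ∀ acc : List Char,
    cs.foldl pvStep acc = (cs.filterMap pvQ).foldl pvStep2 acc := by
  induction cs with
  | nil => intro acc; simp
  | cons c t ih =>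
    intro acc
    simp only [List.foldl_cons, List.filterMap_cons, pv_step_eq]
    cases h : pvQ c <;> simp [ih]

theorem pv_q_space (c d : Char) (h : pvQ c = some d) :
    PySem.Chars.isspace d = decide (d = ' ') := by
  by_cases hd : d = ' '
  · subst hd; decide
  · have hk : pvKeep d = true := by
      unfold pvQ Option.filter pvSub at h
      split_ifs at h <;> simp_all
      · exact absurd h.2.symm hd
      · exact h.2 ▸ h.1
    have h32 : 32 ≤ d.toNat ∧ d.toNat ≤ 126 := by
      unfold pvKeep pvPrintable at hk
      simp at hk
      exact ⟨hk.1.1, hk.1.2⟩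
    have hne : d.toNat ≠ 32 := by
      intro hc
      apply hd
      apply Char.ext
      exact UInt32.toNat_inj.mp (by simpa using hc)
    simp [PySem.Chars.isspace, hd]
    omega

theorem pv_joinApp (w : List Char) (ws : List (List Char)) :
    PySem.Chars.join [' '] (ws ++ [w]) = pvPref ws ++ w := by
  induction ws with
  | nil => simp [PySem.Chars.join_singleton, pvPref]
  | cons a ws ih =>
    cases ws with
    | nil =>
      rw [List.cons_append, List.nil_append, PySem.Chars.join_cons_cons,
        PySem.Chars.join_singleton]
      simp [pvPref, PySem.Chars.join_singleton]
    | cons b ws' =>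
      simp only [List.cons_append]
      rw [PySem.Chars.join_cons_cons]
      rw [show (b :: (ws' ++ [w])) = (b :: ws') ++ [w] from rfl, ih]
      simp only [pvPref, List.isEmpty_cons, Bool.false_eq_true, if_neg, not_false_iff]
      rw [PySem.Chars.join_cons_cons]
      simp

theorem pv_main (l : List Char) : ∀ (cur : List Char) (wsR : List (List Char)),
    (∀ c ∈ l, PySem.Chars.isspace c = decide (c = ' ')) → (' ' ∉ cur) →
    pvStrip (l.foldl pvStep2 (pvPref wsR.reverse ++ cur.reverse))
      = PySem.Chars.join [' '] (PySem.Chars.split₀.go l cur wsR) := by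
  induction l with
  | nil =>
    intro cur wsR _ hcur
    by_cases hc : cur = []
    · subst hc
      simp only [List.foldl_nil, List.reverse_nil, List.append_nil, PySem.Chars.split₀.go]
      by_cases hw : wsR = []
      · subst hw; simp [pvPref, pvStrip, PySem.Chars.join_nil]
      · have : wsR.reverse.isEmpty = false := by simp [hw]
        simp only [pvPref, this, Bool.false_eq_true, if_neg, not_false_iff, List.isEmpty_nil]
        simp only [pvStrip, List.getLast?_append, List.getLast?_singleton]
        simp [hw]
    · -- cur ≠ []
      simp only [List.foldl_nil, PySem.Chars.split₀.go]
      have hc' : cur.isEmpty = false := by simp [hc]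
      simp only [hc', Bool.false_eq_true, if_neg, not_false_iff]
      have : (cur.reverse :: wsR).reverse = wsR.reverse ++ [cur.reverse] := by simp
      rw [this, pv_joinApp]
      -- pvStrip of something ending in cur.head ≠ ' '
      obtain ⟨h, t, rfl⟩ : ∃ h t, cur = h :: t := by
        cases cur with | nil => exact absurd rfl hc | cons h t => exact ⟨h, t, rfl⟩
      have hh : h ≠ ' ' := fun e => hcur (e ▸ List.mem_cons_self)
      simp only [pvStrip]
      rw [if_neg]
      rintro ⟨-, hlast⟩
      rw [List.getLast?_append] at hlast
      simp at hlast
      exact hh hlast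
  | cons c l ih =>
    intro cur wsR hl hcur
    have hc := hl c List.mem_cons_self
    have hl' : ∀ c ∈ l, PySem.Chars.isspace c = decide (c = ' ') :=
      fun x hx => hl x (List.mem_cons_of_mem _ hx)
    by_cases hsp : c = ' '
    · subst hsp
      have hspace : PySem.Chars.isspace ' ' = true := by decide
      rw [PySem.Chars.split₀.go]  -- hope equation rewrite
      simp only [hspace, if_pos]
      by_cases hcnil : cur = []
      · subst hcnil
        simp only [List.isEmpty_nil, if_pos, List.reverse_nil, List.append_nil]
        rw [List.foldl_cons]
        have hst : pvStep2 (pvPref wsR.reverse) ' ' = pvPref wsR.reverse := by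
          unfold pvStep2 pvPref
          by_cases hw : wsR.reverse.isEmpty
          · simp [hw]
          · have hlast : (PySem.Chars.join [' '] wsR.reverse ++ [' ']).getLast? = some ' ' := by
              rw [List.getLast?_append]; simp
            simp [hw, hlast]
        rw [hst]
        simpa using ih [] wsR hl' (by simp)
      · have hc' : cur.isEmpty = false := by simp [hcnil]
        simp only [hc', Bool.false_eq_true, if_neg, not_false_iff]
        rw [List.foldl_cons]
        obtain ⟨h, t, rfl⟩ : ∃ h t, cur = h :: t := by
          cases cur with | nil => exact absurd rfl hcnil | cons h t => exact ⟨h, t, rfl⟩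
        have hh : h ≠ ' ' := fun e => hcur (e ▸ List.mem_cons_self)
        have hlast2 : (pvPref wsR.reverse ++ (h :: t).reverse).getLast? = some h := by
          rw [show (h :: t).reverse = t.reverse ++ [h] by simp, ← List.append_assoc,
            List.getLast?_concat]
        have hcond : (pvPref wsR.reverse ++ (h :: t).reverse) ≠ [] ∧
            (pvPref wsR.reverse ++ (h :: t).reverse).getLast? ≠ some ' ' := by
          refine ⟨fun e => by have := congrArg List.length e; simp at this, ?_⟩
          rw [hlast2]
          simpa using hh
        have hne : (wsR.reverse ++ [(h :: t).reverse]).isEmpty = false := by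
          cases wsR.reverse <;> simp
        have hr : pvPref (wsR.reverse ++ [(h :: t).reverse])
            = pvPref wsR.reverse ++ (h :: t).reverse ++ [' '] := by
          have h1 : pvPref (wsR.reverse ++ [(h :: t).reverse])
              = PySem.Chars.join [' '] (wsR.reverse ++ [(h :: t).reverse]) ++ [' '] := by
            unfold pvPref
            rw [hne]
            simp
          rw [h1, pv_joinApp, List.append_assoc]
        have hstep : pvStep2 (pvPref wsR.reverse ++ (h :: t).reverse) ' '
            = pvPref ((h :: t).reverse :: wsR).reverse := by
          rw [show ((h :: t).reverse :: wsR).reverse = wsR.reverse ++ [(h :: t).reverse] by simp,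
            hr]
          simp [pvStep2, hcond, hh]
        rw [hstep]
        simpa using ih [] ((h :: t).reverse :: wsR) hl' (by simp)
    · have hcf : PySem.Chars.isspace c = false := by rw [hc]; simp [hsp]
      rw [PySem.Chars.split₀.go]
      simp only [hcf, Bool.false_eq_true, if_neg, not_false_iff]
      rw [List.foldl_cons]
      have hstep : pvStep2 (pvPref wsR.reverse ++ cur.reverse) c
          = pvPref wsR.reverse ++ (c :: cur).reverse := by
        unfold pvStep2
        rw [if_neg hsp]
        simp
      rw [hstep]
      exact ih (c :: cur) wsR hl' (by
        intro hmem
        rcases List.mem_cons.mp hmem with e | e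
        · exact hsp e.symm
        · exact hcur e)

-- ===== VERDICT (by name: the statement is the Claim_ definition above) =====
theorem clean_for_draw_py_spec : Claim_equal_clean_for_draw_py := by
  intro text limit _
  unfold Spec_clean_for_draw_py clean_for_draw_py clean_for_draw_py_alt
  dsimp only
  rw [pv_chain_eq]
  rw [PySem.Chars.join_nil_singletons, PySem.Chars.join_nil_singletons]
  rw [List.filter_filterMap]
  have hys : (List.filterMap (fun x => Option.filter (fun c => pvPrintable c && !pvSpecials.contains c) (pvSub x)) text.toList)
      = text.toList.filterMap pvQ := rfl
  rw [hys]
  have hprop : ∀ c ∈ text.toList.filterMap pvQ, PySem.Chars.isspace c = decide (c = ' ') := by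
    intro c hc
    obtain ⟨a, _, ha⟩ := List.mem_filterMap.mp hc
    exact pv_q_space a c ha
  have hmain := pv_main (text.toList.filterMap pvQ) [] [] hprop (by simp)
  simp only [List.reverse_nil, List.append_nil, pvPref, List.isEmpty_nil, if_pos] at hmain
  have hsplit : PySem.Chars.split₀ (text.toList.filterMap pvQ)
      = PySem.Chars.split₀.go (text.toList.filterMap pvQ) [] [] := rfl
  rw [hsplit, ← hmain, pv_fold_eq]
  set out := (text.toList.filterMap pvQ).foldl pvStep2 [] with hout
  have hstrip : (if out ≠ [] ∧ out.getLast? = some ' ' then out.dropLast else out) = pvStrip out := rfl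
  rw [hstrip]
  by_cases he : (pvStrip out).isEmpty
  · have h0 : pvStrip out = [] := List.isEmpty_iff.mp he
    rw [h0]
    simp [PySem.Chars.slice, PySem.List.slice]
  · have he' : (pvStrip out).isEmpty = false := by simpa using he
    rw [if_neg (by simp [he'])]
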